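-- pv_equiv track=rewrite | github.com/Axel-Jacobsen/adventofcode2020 | day24/d24.py | get_max_bounds
-- ===== SOURCE A (Python) =====
-- def get_max_bounds(black_tiles):
--     activ_iter = iter(black_tiles)
--     start = next(activ_iter)
--     max_x, max_y, max_z = start[0], start[1], start[2]
--     min_x, min_y, min_z = start[0], start[1], start[2]
--     for active in black_tiles:
--         min_x = min(min_x, active[0])
--         max_x = max(max_x, active[0])
--         min_y = min(min_y, active[1])
--         max_y = max(max_y, active[1])
--         min_z = min(min_z, active[2])
--         max_z = max(max_z, active[2])
--
--     return (
--         int(min_x) - 2,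
--         int(max_x) + 2,
--         int(min_y) - 2,
--         int(max_y) + 2,
--         int(min_z) - 2,
--         int(max_z) + 2,
--     )
-- ===== SOURCE B (Python) =====
-- def get_max_bounds(black_tiles):
--     xs = [t[0] for t in black_tiles]
--     ys = [t[1] for t in black_tiles]
--     zs = [t[2] for t in black_tiles]
--     return (
--         min(xs) - 2,
--         max(xs) + 2,
--         min(ys) - 2,
--         max(ys) + 2,
--         min(zs) - 2,
--         max(zs) + 2,
--     )
-- ===== Notes on version B (the rewrite author's own statement) =====
-- stated objective: simpler
-- what changed: Replaces the single row-wise loop updating six accumulators with three column-wise projections reduced by builtin min/max per axis.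
import Mathlib
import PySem

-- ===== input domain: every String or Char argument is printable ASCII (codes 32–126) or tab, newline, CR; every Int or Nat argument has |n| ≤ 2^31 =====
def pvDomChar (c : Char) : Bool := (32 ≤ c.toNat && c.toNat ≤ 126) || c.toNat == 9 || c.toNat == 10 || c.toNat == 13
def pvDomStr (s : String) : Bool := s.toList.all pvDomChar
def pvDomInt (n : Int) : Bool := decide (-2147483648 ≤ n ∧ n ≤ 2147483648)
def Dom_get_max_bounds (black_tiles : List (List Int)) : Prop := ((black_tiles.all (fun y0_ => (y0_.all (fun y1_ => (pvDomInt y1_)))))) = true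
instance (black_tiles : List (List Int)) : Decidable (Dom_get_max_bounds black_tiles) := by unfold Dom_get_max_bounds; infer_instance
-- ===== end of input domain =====

-- B replaces A's single row-wise loop over six accumulators by per-axis projections
-- reduced with min/max (objective: simpler decomposition).
-- ===== PORT A =====
def get_max_bounds (black_tiles : List (List Int)) : List Int :=
  match black_tiles with
  | [] => []  -- next(activ_iter) raises StopIteration: excluded by Pre_
  | start :: _ =>
    let max_x := PySem.List.pyGetD start 0 0
    let max_y := PySem.List.pyGetD start 1 0
    let max_z := PySem.List.pyGetD start 2 0
    let min_x := max_x
    let min_y := max_y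
    let min_z := max_z
    let st := black_tiles.foldl
      (fun (s : Int × Int × Int × Int × Int × Int) active =>
        let a0 := PySem.List.pyGetD active 0 0
        let a1 := PySem.List.pyGetD active 1 0
        let a2 := PySem.List.pyGetD active 2 0
        (min s.1 a0, max s.2.1 a0, min s.2.2.1 a1, max s.2.2.2.1 a1,
         min s.2.2.2.2.1 a2, max s.2.2.2.2.2 a2))
      (min_x, max_x, min_y, max_y, min_z, max_z)
    [st.1 - 2, st.2.1 + 2, st.2.2.1 - 2, st.2.2.2.1 + 2, st.2.2.2.2.1 - 2, st.2.2.2.2.2 + 2]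

-- ===== PORT B =====
def get_max_bounds_alt (black_tiles : List (List Int)) : List Int :=
  let xs := black_tiles.map (fun t => PySem.List.pyGetD t 0 0)
  let ys := black_tiles.map (fun t => PySem.List.pyGetD t 1 0)
  let zs := black_tiles.map (fun t => PySem.List.pyGetD t 2 0)
  [(PySem.List.min? xs (fun v => v)).getD 0 - 2,
   (PySem.List.max? xs (fun v => v)).getD 0 + 2,
   (PySem.List.min? ys (fun v => v)).getD 0 - 2,
   (PySem.List.max? ys (fun v => v)).getD 0 + 2,
   (PySem.List.min? zs (fun v => v)).getD 0 - 2,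
   (PySem.List.max? zs (fun v => v)).getD 0 + 2]

-- ===== PRECONDITION & SPEC =====
-- A raises StopIteration on the empty list and IndexError on any row shorter than 3;
-- Pre_ excludes exactly those crashing inputs.
def Pre_get_max_bounds (black_tiles : List (List Int)) : Prop :=
  black_tiles ≠ [] ∧ ∀ t ∈ black_tiles, 3 ≤ t.length
instance (black_tiles : List (List Int)) : Decidable (Pre_get_max_bounds black_tiles) := by
  unfold Pre_get_max_bounds; infer_instance
def pvWitness_get_max_bounds : List (List Int) := [[1, 2, 3], [0, -5, 9]]
def Spec_get_max_bounds (black_tiles : List (List Int)) (out : List Int) : Prop := out = get_max_bounds_alt black_tiles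
instance (black_tiles : List (List Int)) (out : List Int) : Decidable (Spec_get_max_bounds black_tiles out) := by unfold Spec_get_max_bounds; infer_instance

-- ===== CLAIM (what is proved, stated in full; the proofs are below) =====
def Claim_equal_get_max_bounds : Prop := ∀ (black_tiles : List (List Int)), Dom_get_max_bounds black_tiles → Pre_get_max_bounds black_tiles → Spec_get_max_bounds black_tiles (get_max_bounds black_tiles)

-- ===== LEMMAS AND PROOFS =====
-- A's six-accumulator fold, decomposed into six independent min/max folds.
theorem fold6_eq (l : List (List Int)) (a b c d e f : Int) :
    l.foldl
      (fun (s : Int × Int × Int × Int × Int × Int) active =>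
        let a0 := PySem.List.pyGetD active 0 0
        let a1 := PySem.List.pyGetD active 1 0
        let a2 := PySem.List.pyGetD active 2 0
        (min s.1 a0, max s.2.1 a0, min s.2.2.1 a1, max s.2.2.2.1 a1,
         min s.2.2.2.2.1 a2, max s.2.2.2.2.2 a2))
      (a, b, c, d, e, f)
    = ((l.map (fun t => PySem.List.pyGetD t 0 0)).foldl min a,
       (l.map (fun t => PySem.List.pyGetD t 0 0)).foldl max b,
       (l.map (fun t => PySem.List.pyGetD t 1 0)).foldl min c,
       (l.map (fun t => PySem.List.pyGetD t 1 0)).foldl max d,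
       (l.map (fun t => PySem.List.pyGetD t 2 0)).foldl min e,
       (l.map (fun t => PySem.List.pyGetD t 2 0)).foldl max f) := by
  induction l generalizing a b c d e f with
  | nil => rfl
  | cons h t ih => simp [List.foldl_cons, ih]

-- ===== VERDICT (by name: the statement is the Claim_ definition above) =====
theorem get_max_bounds_spec : Claim_equal_get_max_bounds := by
  intro bt _ hpre
  unfold Spec_get_max_bounds
  match bt, hpre with
  | start :: t, _ =>
    simp [get_max_bounds, get_max_bounds_alt, fold6_eq,
      PySem.List.min?_id_cons, PySem.List.max?_id_cons, List.foldl_cons,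
      min_self, max_self]
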